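-- pv_equiv track=rewrite | github.com/abstrask/advent-of-code | 2022/7/part1_broken.py | dir_tot_size
-- ===== SOURCE A (Python) =====
-- def dir_tot_size(rel_size):
--     tot_size = {}
--     for path in rel_size.keys():
--         for i, (k, v) in enumerate(rel_size.items()):
--             if k.startswith(path):
--                 if path in tot_size.keys():
--                     tot_size[path] += v
--                 else:
--                     tot_size[path] = v
--     return tot_size
-- ===== SOURCE B (Python) =====
-- def dir_tot_size(rel_size):
--     # Index by enumerating each key's prefixes once (O(total key length) dict hits)
--     # instead of rescanning every item for every path.
--     tot = {p: 0 for p in rel_size}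
--     for k, v in rel_size.items():
--         for i in range(len(k) + 1):
--             q = k[:i]
--             if q in tot:
--                 tot[q] += v
--     return tot
-- ===== Notes on version B (the rewrite author's own statement) =====
-- stated objective: faster
-- what changed: replaces A's nested scan (for every path, rescan all items with startswith) by a prefix-enumeration index: build the key dict once, then one pass over the items adding each value to every prefix of its key that is itself a key
import Mathlib
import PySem

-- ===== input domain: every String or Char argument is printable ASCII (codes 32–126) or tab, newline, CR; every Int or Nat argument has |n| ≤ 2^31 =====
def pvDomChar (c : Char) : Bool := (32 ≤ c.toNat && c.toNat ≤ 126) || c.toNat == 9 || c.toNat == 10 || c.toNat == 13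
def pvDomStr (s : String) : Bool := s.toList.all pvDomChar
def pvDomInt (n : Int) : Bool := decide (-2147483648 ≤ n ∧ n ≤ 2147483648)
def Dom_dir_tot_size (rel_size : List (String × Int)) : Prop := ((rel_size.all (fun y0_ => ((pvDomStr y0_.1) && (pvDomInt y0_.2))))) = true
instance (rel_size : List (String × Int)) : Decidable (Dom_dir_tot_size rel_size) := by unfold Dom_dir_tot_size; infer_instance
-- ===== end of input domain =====

-- B replaces A's nested scan (for every path, rescan ALL items testing startswith) by a
-- prefix-enumeration index: one dict of keys built once, then ONE pass over the items
-- adding each value to every prefix of its key that is itself a key — O(n*L) dict hits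
-- instead of O(n^2) startswith tests.


-- ===== PORT A =====
-- body of A's inner loop: 'if k.startswith(path): if path in tot: tot[path] += v else: tot[path] = v'
def pvAInner (path : String) (tot : PySem.Dict String Int) (kv : String × Int) : PySem.Dict String Int :=
  if PySem.Str.startswith kv.1 path then
    if tot.contains path then tot.insert path (tot.getD path 0 + kv.2)
    else tot.insert path kv.2
  else tot

def dir_tot_size (rel_size : List (String × Int)) : List (String × Int) :=
  ((rel_size.map Prod.fst).foldl
    (fun tot path => rel_size.foldl (pvAInner path) tot)
    PySem.Dict.empty).items

-- ===== PORT B =====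
-- tot = {p: 0 for p in rel_size}; for k, v in items: for i in range(len(k)+1): q = k[:i]; if q in tot: tot[q] += v
def dir_tot_size_alt (rel_size : List (String × Int)) : List (String × Int) :=
  (rel_size.foldl
    (fun tot kv =>
      (PySem.List.pyRange 0 (PySem.Str.len kv.1 + 1) 1).foldl
        (fun tot i =>
          let q := PySem.Str.slice kv.1 none (some i)
          if tot.contains q then tot.insert q (tot.getD q 0 + kv.2) else tot)
        tot)
    ((rel_size.map Prod.fst).foldl (fun tot p => tot.insert p (0 : Int)) PySem.Dict.empty)).items

-- ===== PRECONDITION & SPEC =====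
-- rel_size stands for a Python dict[str,int]; a dict's keys are necessarily distinct, so
-- lists whose first components repeat represent no actual input of A.
def Pre_dir_tot_size (rel_size : List (String × Int)) : Prop := (rel_size.map Prod.fst).Nodup
instance (rel_size : List (String × Int)) : Decidable (Pre_dir_tot_size rel_size) := by unfold Pre_dir_tot_size; infer_instance
def pvWitness_dir_tot_size : (List (String × Int)) := [("/", 10), ("/a", 3), ("/a/b", 4), ("/c", 5)]

def Spec_dir_tot_size (rel_size : List (String × Int)) (out : List (String × Int)) : Prop := out = dir_tot_size_alt rel_size
instance (rel_size : List (String × Int)) (out : List (String × Int)) : Decidable (Spec_dir_tot_size rel_size out) := by unfold Spec_dir_tot_size; infer_instance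

-- ===== CLAIM (what is proved, stated in full; the proofs are below) =====
def Claim_equal_dir_tot_size : Prop := ∀ (rel_size : List (String × Int)), Dom_dir_tot_size rel_size → Pre_dir_tot_size rel_size → Spec_dir_tot_size rel_size (dir_tot_size rel_size)

-- ===== LEMMAS AND PROOFS =====

-- the canonical value both sides reach: for key p, the sum of values at keys with prefix p
def pvSumMatching (rel_size : List (String × Int)) (p : String) : Int :=
  ((rel_size.filter (fun kv => PySem.Str.startswith kv.1 p)).map Prod.snd).sum

-- the prefixes k[:0], k[:1], …, k[:len(k)] that B's inner loop enumerates
def pvPrefixes (k : String) : List String :=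
  (PySem.List.pyRange 0 (PySem.Str.len k + 1) 1).map (fun i => PySem.Str.slice k none (some i))

-- B's inner-loop body as a function of the already-sliced prefix
def pvBStep (v : Int) (tot : PySem.Dict String Int) (q : String) : PySem.Dict String Int :=
  if tot.contains q then tot.insert q (tot.getD q 0 + v) else tot

-- ---------- A side (nested scan) ----------

-- two dicts with the same items list are equal (Dict is a one-field structure)
lemma pvDictEq {κ ν : Type} (d : PySem.Dict κ ν) (xs : List (κ × ν)) (h : d.items = xs) :
    d = PySem.Dict.mk xs := by cases d; cases h; rfl

-- inserting at a key that sits last (and nowhere else) overwrites in place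
lemma pvInsertLast (base : List (String × Int)) (p : String) (c v : Int)
    (h : p ∉ base.map Prod.fst) :
    (PySem.Dict.mk (base ++ [(p, c)])).insert p v = PySem.Dict.mk (base ++ [(p, v)]) := by
  have hcon : (PySem.Dict.mk (base ++ [(p, c)])).contains p = true := by
    simp [PySem.Dict.contains_mk]
  apply pvDictEq
  rw [PySem.Dict.items_insert_of_contains _ v hcon]
  show List.map _ (base ++ [(p, c)]) = _
  rw [List.map_append]
  congr 1
  · refine (List.map_congr_left fun q hq => ?_).trans (List.map_id _)
    have : q.1 ≠ p := fun hq1 => h (hq1 ▸ List.mem_map_of_mem hq)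
    simp [this]
  · simp

-- a key not in the dict is appended
lemma pvInsertFresh (d : PySem.Dict String Int) (p : String) (v : Int)
    (h : d.contains p = false) :
    d.insert p v = PySem.Dict.mk (d.items ++ [(p, v)]) := by
  exact pvDictEq _ _ (PySem.Dict.items_insert_of_not_contains d v h)

lemma pvNotMemOfContainsFalse (d : PySem.Dict String Int) (p : String)
    (h : d.contains p = false) : p ∉ d.items.map Prod.fst := by
  obtain ⟨ps⟩ := d
  simp [PySem.Dict.contains_mk] at h
  intro hmem
  obtain ⟨q, hq, hq1⟩ := List.mem_map.mp hmem
  exact h q.1 q.2 hq hq1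

-- A's inner loop, on a dict of the shape base ++ [(p, c)] with p not in base: it only
-- grows the last value, adding every matching kv.2
lemma pvInner_present (l : List (String × Int)) (p : String) :
    ∀ (base : List (String × Int)) (c : Int), p ∉ base.map Prod.fst →
    l.foldl (pvAInner p) (PySem.Dict.mk (base ++ [(p, c)])) =
      PySem.Dict.mk (base ++ [(p, c + pvSumMatching l p)]) := by
  induction l with
  | nil => intro base c h; simp [pvSumMatching]
  | cons kv t ih =>
    intro base c h
    by_cases hs : PySem.Str.startswith kv.1 p = true
    · have hsC : PySem.Chars.startswith kv.1.toList p.toList = true := by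
        simpa [PySem.Str.startswith_eq] using hs
      have hcon : (PySem.Dict.mk (base ++ [(p, c)])).contains p = true := by
        simp [PySem.Dict.contains_mk]
      have hsum : pvSumMatching (kv :: t) p = kv.2 + pvSumMatching t p := by
        simp [pvSumMatching, hsC]
      rw [List.foldl_cons]
      simp only [pvAInner, hs, if_true, hcon]
      have hget : (PySem.Dict.mk (base ++ [(p, c)])).getD p 0 = c := by
        clear ih hsum; induction base with
        | nil => simp [PySem.Dict.getD_eq_get?_getD, PySem.Dict.get?_mk_cons]
        | cons q bt ihb =>
          have hq : (q.1 == p) = false := by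
            simp at h; simpa [beq_iff_eq] using fun hq1 => h.1 hq1.symm
          have hh : p ∉ bt.map Prod.fst := by simp at h ⊢; exact h.2
          rw [List.cons_append]
          rw [PySem.Dict.getD_eq_get?_getD, (by rfl : (PySem.Dict.mk (q :: (bt ++ [(p, c)]))) = PySem.Dict.mk ((q.1, q.2) :: (bt ++ [(p, c)]))), PySem.Dict.get?_mk_cons]
          rw [hq]
          simpa [PySem.Dict.getD_eq_get?_getD] using ihb hh
      rw [hget, pvInsertLast base p c (c + kv.2) h, ih base (c + kv.2) h, hsum]
      ring_nf
    · have hsC : PySem.Chars.startswith kv.1.toList p.toList = false := by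
        rw [PySem.Str.startswith_eq] at hs; simpa using hs
      have hsum : pvSumMatching (kv :: t) p = pvSumMatching t p := by
        simp [pvSumMatching, hsC]
      rw [List.foldl_cons]
      simp only [pvAInner, hs, if_false, Bool.false_eq_true]
      rw [ih base c h, hsum]

-- A's inner loop from a dict not containing p, when some item matches p:
-- it appends exactly one entry (p, sum of matching values)
lemma pvInner_absent (l : List (String × Int)) (p : String) :
    ∀ (d : PySem.Dict String Int), d.contains p = false →
    (l.any (fun kv => PySem.Str.startswith kv.1 p)) = true →
    l.foldl (pvAInner p) d = PySem.Dict.mk (d.items ++ [(p, pvSumMatching l p)]) := by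
  induction l with
  | nil => intro d _ hany; simp at hany
  | cons kv t ih =>
    intro d hd hany
    by_cases hs : PySem.Str.startswith kv.1 p = true
    · have hsC : PySem.Chars.startswith kv.1.toList p.toList = true := by
        simpa [PySem.Str.startswith_eq] using hs
      have hnotmem : p ∉ d.items.map Prod.fst := pvNotMemOfContainsFalse d p hd
      have hsum : pvSumMatching (kv :: t) p = kv.2 + pvSumMatching t p := by
        simp [pvSumMatching, hsC]
      rw [List.foldl_cons]
      simp only [pvAInner, hs, if_true, hd, Bool.false_eq_true, if_false]
      rw [pvInsertFresh d p kv.2 hd, pvInner_present t p d.items kv.2 hnotmem, hsum]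
    · have hany' : (t.any (fun kv => PySem.Str.startswith kv.1 p)) = true := by
        simp only [List.any_cons, hs, Bool.false_or] at hany; exact hany
      have hsC : PySem.Chars.startswith kv.1.toList p.toList = false := by
        rw [PySem.Str.startswith_eq] at hs; simpa using hs
      have hsum : pvSumMatching (kv :: t) p = pvSumMatching t p := by
        simp [pvSumMatching, hsC]
      rw [List.foldl_cons]
      simp only [pvAInner, hs, if_false, Bool.false_eq_true]
      rw [ih d hd hany', hsum]

-- A's outer loop over distinct fresh paths appends one summary entry per path
lemma pvOuter (l : List (String × Int)) :
    ∀ (paths : List String) (d : PySem.Dict String Int), paths.Nodup →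
    (∀ p ∈ paths, (l.any (fun kv => PySem.Str.startswith kv.1 p)) = true) →
    (∀ p ∈ paths, d.contains p = false) →
    (paths.foldl (fun tot path => l.foldl (pvAInner path) tot) d).items =
      d.items ++ paths.map (fun p => (p, pvSumMatching l p)) := by
  intro paths
  induction paths with
  | nil => intro d _ _ _; simp
  | cons p t ih =>
    intro d hnd hany hfresh
    rw [List.foldl_cons]
    rw [pvInner_absent l p d (hfresh p (by simp)) (hany p (by simp))]
    rw [ih (PySem.Dict.mk (d.items ++ [(p, pvSumMatching l p)]))
        (by exact hnd.of_cons)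
        (fun q hq => hany q (by simp [hq]))
        (fun q hq => by
          have hq1 : q ≠ p := by rintro rfl; exact (List.nodup_cons.mp hnd).1 hq
          have hq2 : d.contains q = false := hfresh q (by simp [hq])
          obtain ⟨ps⟩ := d
          simp [PySem.Dict.contains_mk] at hq2 ⊢
          exact ⟨hq2, fun h => hq1 h.symm⟩)]
    simp

lemma pvAResult (l : List (String × Int)) (hpre : (l.map Prod.fst).Nodup) :
    dir_tot_size l = (l.map Prod.fst).map (fun p => (p, pvSumMatching l p)) := by
  unfold dir_tot_size
  rw [pvOuter l (l.map Prod.fst) PySem.Dict.empty hpre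
      (fun p hp => by
        obtain ⟨⟨k, v⟩, hkv, rfl⟩ := List.mem_map.mp hp
        refine List.any_eq_true.mpr ⟨(k, v), hkv, ?_⟩
        simp [pysem])
      (fun p _ => by simp [pysem])]
  rfl

-- ---------- B side (prefix enumeration) ----------

lemma pvMemPrefixes (k p : String) :
    p ∈ pvPrefixes k ↔ PySem.Str.startswith k p = true := by
  unfold pvPrefixes
  rw [List.mem_map]
  constructor
  · rintro ⟨i, hi, rfl⟩
    rw [PySem.List.mem_pyRange_one] at hi
    obtain ⟨j, rfl⟩ := Int.eq_ofNat_of_zero_le hi.1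
    simp only [PySem.Str.startswith_eq, PySem.Chars.startswith_iff]
    have : (PySem.Str.slice k none (some (j : Int))).toList = k.toList.take j := by
      simp [pysem, PySem.List.slice_to_natCast]
    rw [this]
    exact List.take_prefix _ _
  · intro hs
    rw [PySem.Str.startswith_eq, PySem.Chars.startswith_iff] at hs
    refine ⟨(p.toList.length : Int), ?_, ?_⟩
    · rw [PySem.List.mem_pyRange_one]
      have := hs.length_le
      constructor
      · positivity
      · simp only [PySem.Str.len_eq]
        omega
    · apply String.ext
      simp [pysem, PySem.List.slice_to_natCast]
      rw [List.prefix_iff_eq_take] at hs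
      exact hs.symm
lemma pvPrefixesNodup (k : String) : (pvPrefixes k).Nodup := by
  unfold pvPrefixes
  refine (PySem.List.nodup_pyRange_one _ _).map_on ?_
  intro i hi j hj hij
  rw [PySem.List.mem_pyRange_one] at hi hj
  obtain ⟨a, rfl⟩ := Int.eq_ofNat_of_zero_le hi.1
  obtain ⟨b, rfl⟩ := Int.eq_ofNat_of_zero_le hj.1
  have ha : a ≤ k.toList.length := by
    have := hi.2; simp only [PySem.Str.len_eq] at this; omega
  have hb : b ≤ k.toList.length := by
    have := hj.2; simp only [PySem.Str.len_eq] at this; omega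
  have h2 : (PySem.Str.slice k none (some (a : Int))).toList
      = (PySem.Str.slice k none (some (b : Int))).toList := by rw [hij]
  simp only [PySem.Str.toList_slice, PySem.Chars.slice_eq_listSlice,
    PySem.List.slice_to_natCast] at h2
  have : a = b := by
    have hla : (k.toList.take a).length = a := by rw [List.length_take]; omega
    have hlb : (k.toList.take b).length = b := by rw [List.length_take]; omega
    rw [← hla, ← hlb, h2]
  exact_mod_cast this

-- B's inner loop over a Nodup list of prefixes, on a dict keyed by Nodup keys:
-- exactly the keys that occur among the prefixes get v added
lemma pvBInnerFold (v : Int) (qs : List String) (hqs : qs.Nodup) :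
    ∀ (keys : List String) (g : String → Int), keys.Nodup →
    qs.foldl (pvBStep v) (PySem.Dict.mk (keys.map fun p => (p, g p))) =
      PySem.Dict.mk (keys.map fun p => (p, g p + if p ∈ qs then v else 0)) := by
  induction qs with
  | nil => intro keys g _; simp
  | cons q rest ih =>
    intro keys g hk
    have hqrest : q ∉ rest := (List.nodup_cons.mp hqs).1
    rw [List.foldl_cons]
    by_cases hq : q ∈ keys
    · have hcon : (PySem.Dict.mk (keys.map fun p => (p, g p))).contains q = true := by
        rw [PySem.Dict.contains_mk]
        exact List.any_eq_true.mpr ⟨(q, g q), List.mem_map.mpr ⟨q, hq, rfl⟩, by simp⟩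
      have hkeysnd : (PySem.Dict.mk (keys.map fun p => (p, g p))).keys.Nodup := by
        show ((keys.map fun p => (p, g p)).map Prod.fst).Nodup
        simpa [List.map_map, Function.comp_def] using hk
      have hget : (PySem.Dict.mk (keys.map fun p => (p, g p))).getD q 0 = g q := by
        have hm : (q, g q) ∈ (PySem.Dict.mk (keys.map fun p => (p, g p))).items :=
          List.mem_map.mpr ⟨q, hq, rfl⟩
        exact PySem.Dict.getD_of_mem_items _ hm hkeysnd 0
      have hins : (PySem.Dict.mk (keys.map fun p => (p, g p))).insert q (g q + v)
          = PySem.Dict.mk (keys.map fun p => (p, if p = q then g p + v else g p)) := by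
        apply pvDictEq
        rw [PySem.Dict.items_insert_of_contains _ _ hcon]
        show (keys.map fun p => (p, g p)).map _ = _
        rw [List.map_map]
        refine List.map_congr_left fun p hp => ?_
        by_cases hpq : p = q
        · subst hpq; simp
        · simp [hpq]
      simp only [pvBStep, hcon, if_true, hget, hins]
      rw [ih (List.nodup_cons.mp hqs).2 keys _ hk]
      congr 1
      refine List.map_congr_left fun p hp => ?_
      by_cases hpq : p = q
      · subst hpq; simp [hqrest]
      · simp [hpq]
    · have hcon : (PySem.Dict.mk (keys.map fun p => (p, g p))).contains q = false := by
        rw [PySem.Dict.contains_mk]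
        refine List.any_eq_false.mpr ?_
        intro x hx
        obtain ⟨p, hp, rfl⟩ := List.mem_map.mp hx
        simp only [beq_iff_eq]
        exact fun h => hq (h ▸ hp)
      simp only [pvBStep, hcon, Bool.false_eq_true, if_false]
      rw [ih (List.nodup_cons.mp hqs).2 keys g hk]
      congr 1
      refine List.map_congr_left fun p hp => ?_
      have hpq : p ≠ q := fun h => hq (h ▸ hp)
      simp [hpq]

-- B's outer loop: one pass over the items accumulates pvSumMatching at every key
lemma pvBOuter (items : List (String × Int)) :
    ∀ (keys : List String) (g : String → Int), keys.Nodup →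
    items.foldl
      (fun tot kv =>
        (PySem.List.pyRange 0 (PySem.Str.len kv.1 + 1) 1).foldl
          (fun tot i =>
            let q := PySem.Str.slice kv.1 none (some i)
            if tot.contains q then tot.insert q (tot.getD q 0 + kv.2) else tot)
          tot)
      (PySem.Dict.mk (keys.map fun p => (p, g p))) =
      PySem.Dict.mk (keys.map fun p => (p, g p + pvSumMatching items p)) := by
  induction items with
  | nil =>
    intro keys g _
    simp [pvSumMatching]
  | cons kv t ih =>
    intro keys g hk
    rw [List.foldl_cons]
    have hinner :
        (PySem.List.pyRange 0 (PySem.Str.len kv.1 + 1) 1).foldl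
          (fun tot i =>
            let q := PySem.Str.slice kv.1 none (some i)
            if tot.contains q then tot.insert q (tot.getD q 0 + kv.2) else tot)
          (PySem.Dict.mk (keys.map fun p => (p, g p)))
        = (pvPrefixes kv.1).foldl (pvBStep kv.2)
            (PySem.Dict.mk (keys.map fun p => (p, g p))) := by
      unfold pvPrefixes
      rw [List.foldl_map]
      rfl
    rw [hinner, pvBInnerFold kv.2 (pvPrefixes kv.1) (pvPrefixesNodup kv.1) keys g hk,
      ih keys _ hk]
    congr 1
    refine List.map_congr_left fun p hp => ?_
    have hmem : (p ∈ pvPrefixes kv.1) ↔ PySem.Str.startswith kv.1 p = true :=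
      pvMemPrefixes kv.1 p
    by_cases hs : PySem.Str.startswith kv.1 p = true
    · have hsC : PySem.Chars.startswith kv.1.toList p.toList = true := by
        simpa [PySem.Str.startswith_eq] using hs
      have : pvSumMatching (kv :: t) p = kv.2 + pvSumMatching t p := by
        simp [pvSumMatching, hsC]
      simp [hmem.mpr hs, this]
      ring
    · have hsC : PySem.Chars.startswith kv.1.toList p.toList = false := by
        rw [PySem.Str.startswith_eq] at hs; simpa using hs
      have : pvSumMatching (kv :: t) p = pvSumMatching t p := by
        simp [pvSumMatching, hsC]
      have hnot : p ∉ pvPrefixes kv.1 := fun h => hs (hmem.mp h)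
      simp [hnot, this]

lemma pvBResult (l : List (String × Int)) (hpre : (l.map Prod.fst).Nodup) :
    dir_tot_size_alt l = (l.map Prod.fst).map (fun p => (p, pvSumMatching l p)) := by
  unfold dir_tot_size_alt
  have h0 : (l.map Prod.fst).foldl (fun tot p => tot.insert p (0 : Int)) PySem.Dict.empty
      = PySem.Dict.mk ((l.map Prod.fst).map fun p => (p, (0 : Int))) := by
    apply pvDictEq
    rw [PySem.Dict.items_foldl_insert_fresh (l.map Prod.fst) (fun p => p) (fun _ => (0 : Int))
      PySem.Dict.empty (fun a _ => by simp [pysem]) (by simpa using hpre)]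
    rfl
  rw [h0, pvBOuter l (l.map Prod.fst) (fun _ => 0) hpre]
  show List.map _ _ = _
  refine List.map_congr_left fun p hp => ?_
  simp

-- ===== VERDICT (by name: the statement is the Claim_ definition above) =====
theorem dir_tot_size_spec : Claim_equal_dir_tot_size := by
  intro l _ hpre
  unfold Spec_dir_tot_size
  rw [pvAResult l hpre, pvBResult l hpre]
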